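-- pv_equiv track=rewrite | github.com/4wardEnergyResearch/WHY | Blackout_model.py | count_consecutive_events
-- ===== SOURCE A (Python) =====
-- def count_consecutive_events(series, event):
--     """
--     Creates a list where successive events are counted. Interruptions set counter to 0.
--
--     Parameters
--     ----------
--     series : series
--         Input series.
--     event : int/str
--         Event that increases the counter.
--
--     Returns
--     -------
--     count_list : list[int]
--         List of successive events.
--
--     """
--
--     count_list = []
--     count = 0
--
--     for index, value in enumerate(series):
--         if value == event:
--             count += 1
--             count_list.append(count)
--         else:
--             count = 0
--             count_list.append(count)
--
--     return count_list
-- ===== SOURCE B (Python) =====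
-- from itertools import groupby
--
-- def count_consecutive_events(series, event):
--     count_list = []
--     for key, grp in groupby(series, key=lambda v: v == event):
--         n = len(list(grp))
--         if key:
--             count_list.extend(range(1, n + 1))
--         else:
--             count_list.extend([0] * n)
--     return count_list
-- ===== Notes on version B (the rewrite author's own statement) =====
-- stated objective: alternative
-- what changed: Replaces the live element-by-element counter with itertools.groupby run-splitting: the series is cut into maximal runs keyed on value == event, and each run emits 1..len(run) or len(run) zeros at once.
import Mathlib
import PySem

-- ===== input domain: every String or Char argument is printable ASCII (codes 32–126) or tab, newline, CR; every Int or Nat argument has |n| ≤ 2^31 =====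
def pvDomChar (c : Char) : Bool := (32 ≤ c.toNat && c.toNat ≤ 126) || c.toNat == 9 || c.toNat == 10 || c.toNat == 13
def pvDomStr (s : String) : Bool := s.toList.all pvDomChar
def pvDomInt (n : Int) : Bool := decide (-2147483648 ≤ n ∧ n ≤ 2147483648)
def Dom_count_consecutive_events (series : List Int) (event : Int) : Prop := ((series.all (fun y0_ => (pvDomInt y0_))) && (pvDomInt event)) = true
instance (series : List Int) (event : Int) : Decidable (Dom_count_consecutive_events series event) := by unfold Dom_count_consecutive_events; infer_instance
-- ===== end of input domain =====

-- B replaces A's live element-by-element counter with groupby run-splitting (same cost, different decomposition).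

-- ===== PORT A =====
-- A's for-loop carrying `count`, emitting one element per series element
def countGoA (event : Int) : List Int → Int → List Int
  | [], _ => []
  | v :: rest, count =>
    if v == event then (count + 1) :: countGoA event rest (count + 1)
    else 0 :: countGoA event rest 0

def count_consecutive_events (series : List Int) (event : Int) : List Int :=
  countGoA event series 0

-- ===== PORT B =====
-- groupby: split off the maximal run sharing the key (v == event), emit 1..n or n zeros, recurse on the rest
def countGoB (event : Int) : List Int → List Int
  | [] => []
  | v :: rest =>
    if v == event then
      let n := (rest.takeWhile (fun w => w == event)).length + 1
      ((List.range n).map (fun (i : ℕ) => (i : Int) + 1)) ++ countGoB event (rest.dropWhile (fun w => w == event))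
    else
      let n := (rest.takeWhile (fun w => !(w == event))).length + 1
      (List.replicate n (0 : Int)) ++ countGoB event (rest.dropWhile (fun w => !(w == event)))
  termination_by l => l.length
  decreasing_by
  · exact Nat.lt_succ_of_le (List.length_dropWhile_le _ _)
  · exact Nat.lt_succ_of_le (List.length_dropWhile_le _ _)

def count_consecutive_events_alt (series : List Int) (event : Int) : List Int :=
  countGoB event series

-- ===== PRECONDITION & SPEC =====
def Spec_count_consecutive_events (series : List Int) (event : Int) (out : List Int) : Prop := out = count_consecutive_events_alt series event
instance (series : List Int) (event : Int) (out : List Int) : Decidable (Spec_count_consecutive_events series event out) := by unfold Spec_count_consecutive_events; infer_instance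

-- ===== CLAIM (what is proved, stated in full; the proofs are below) =====
def Claim_equal_count_consecutive_events : Prop := ∀ (series : List Int) (event : Int), Dom_count_consecutive_events series event → Spec_count_consecutive_events series event (count_consecutive_events series event)

-- ===== LEMMAS AND PROOFS =====

-- A's loop through an event-run: emits count+1, count+2, … and lands on the run's tail with counter reset
theorem countGoA_event_run (event : Int) (l : List Int) (c : Int) :
    countGoA event l c =
      ((List.range (l.takeWhile (fun w => w == event)).length).map (fun (i : ℕ) => c + 1 + (i : Int)))
        ++ countGoA event (l.dropWhile (fun w => w == event)) 0 := by
  induction l generalizing c with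
  | nil => simp [countGoA]
  | cons v rest ih =>
    by_cases hv : v == event
    · simp only [countGoA, List.takeWhile_cons, List.dropWhile_cons, hv, if_true]
      rw [ih (c + 1)]
      rw [List.length_cons, List.range_succ_eq_map, List.map_cons, List.map_map]
      simp only [List.cons_append, List.cons.injEq, Nat.cast_zero]
      refine ⟨by ring, ?_⟩
      congr 1
      apply List.map_congr_left
      intro i _
      simp only [Function.comp]
      push_cast
      ring
    · have h0 : countGoA event (v :: rest) c = 0 :: countGoA event rest 0 := by
        simp [countGoA, hv]
      rw [h0]
      simp only [List.takeWhile_cons, List.dropWhile_cons, hv]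
      simp [countGoA, hv]

-- A's loop through a non-event run starting with counter 0: emits zeros and lands on the tail
theorem countGoA_zero_run (event : Int) (l : List Int) :
    countGoA event l 0 =
      (List.replicate (l.takeWhile (fun w => !(w == event))).length (0 : Int))
        ++ countGoA event (l.dropWhile (fun w => !(w == event))) 0 := by
  induction l with
  | nil => simp [countGoA]
  | cons v rest ih =>
    by_cases hv : v == event
    · simp [hv]
    · have h0 : countGoA event (v :: rest) 0 = 0 :: countGoA event rest 0 := by
        simp [countGoA, hv]
      rw [h0, ih]
      simp only [List.takeWhile_cons, List.dropWhile_cons, hv]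
      simp [List.replicate_succ]

theorem countGoA_eq_countGoB (event : Int) : ∀ (n : ℕ) (l : List Int), l.length ≤ n →
    countGoA event l 0 = countGoB event l := by
  intro n
  induction n with
  | zero =>
    intro l hl
    have h0 : l = [] := List.eq_nil_of_length_eq_zero (Nat.le_zero.mp hl)
    subst h0; simp [countGoA, countGoB]
  | succ n ih =>
    intro l hl
    match l with
    | [] => simp [countGoA, countGoB]
    | v :: rest =>
      by_cases hv : v == event
      · rw [countGoA_event_run, countGoB]
        simp only [hv, if_true, List.takeWhile_cons, List.dropWhile_cons]
        rw [ih (rest.dropWhile (fun w => w == event))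
            (le_trans (List.length_dropWhile_le _ _) (Nat.le_of_succ_le_succ (by simpa using hl)))]
        congr 1
        · simp only [List.length_cons]
          apply List.map_congr_left
          intro i _
          omega
      · rw [countGoA_zero_run, countGoB]
        simp only [hv, Bool.false_eq_true, if_false, if_true, List.takeWhile_cons, List.dropWhile_cons, Bool.not_false, List.length_cons]
        rw [ih (rest.dropWhile (fun w => !(w == event)))
            (le_trans (List.length_dropWhile_le _ _) (Nat.le_of_succ_le_succ (by simpa using hl)))]

-- ===== VERDICT (by name: the statement is the Claim_ definition above) =====
theorem count_consecutive_events_spec : Claim_equal_count_consecutive_events := by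
  intro series event _
  unfold Spec_count_consecutive_events count_consecutive_events count_consecutive_events_alt
  exact countGoA_eq_countGoB event series.length series le_rfl
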